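-- pv_equiv track=rewrite | github.com/SHaiderX/ICS4U | a3/club_functions.py | recommend_clubs
-- ===== SOURCE A (Python) =====
-- from typing import List, Tuple, Dict, TextIO
--
-- def recommend_clubs(
--         person_to_friends: Dict[str, List[str]],
--         person_to_clubs: Dict[str, List[str]],
--         person: str) -> List[Tuple[str, int]]:
--     """Return a list of club recommendations for person based on the
--     "person to friends" dictionary person_to_friends and the "person
--     to clubs" dictionary person_to_clubs using the specified
--     recommendation system.
--
--     >>> recommend_clubs(P2F, P2C, 'Stephanie J Tanner')
--     [('Comet Club', 1), ('Rock N Rollers', 1), ('Smash Club', 1)]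
--     """
--     clubs = []
--
--     if person in person_to_clubs:
--         MyClubs = person_to_clubs[person]
--     else:
--         MyClubs = []
--
--     if person in person_to_friends:
--         friends = person_to_friends[person]
--     else:
--         friends = []
--
--     #List of clubs person is not in
--     for people in person_to_clubs:
--         for cl in person_to_clubs[people]:
--             if cl not in clubs and cl not in MyClubs:
--                 clubs.append(cl)
--     clubs.sort()
--
--     score = []
--     #For if a friend is in the club
--     for i in range(0, len(clubs)):
--         for fr in friends:
--             if fr in person_to_clubs:
--                 if clubs[i] in person_to_clubs[fr]:
--                     score.append(i)
--
--     ClubMembers = []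
--     for x1 in MyClubs:
--         for x2 in person_to_clubs:
--             if x1 in person_to_clubs[x2]:
--                 ClubMembers.append(x2)
--
--     #For if club member shares the same club
--     for i1 in range(0, len(clubs)):
--         for fr1 in ClubMembers:
--             if clubs[i1] in person_to_clubs[fr1]:
--                 score.append(i1)
--
--     ClubScore = []
--     for f in range(0, len(clubs)):
--         s = score.count(f)
--         if s > 0:
--             ClubScore.append((clubs[f], s))
--
--     return ClubScore
-- ===== SOURCE B (Python) =====
-- def recommend_clubs(person_to_friends, person_to_clubs, person):
--     my_clubs = person_to_clubs.get(person, [])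
--     my_set = set(my_clubs)
--     friend_count = {}
--     for fr in person_to_friends.get(person, []):
--         friend_count[fr] = friend_count.get(fr, 0) + 1
--     score = {}
--     for p, club_list in person_to_clubs.items():
--         club_set = set(club_list)
--         w = friend_count.get(p, 0)
--         for c in my_clubs:
--             if c in club_set:
--                 w += 1
--         if w > 0:
--             for c in club_set:
--                 if c not in my_set:
--                     score[c] = score.get(c, 0) + w
--     return sorted(score.items())
-- ===== Notes on version B (the rewrite author's own statement) =====
-- stated objective: faster
-- what changed: Instead of building the sorted candidate-club list and then, for every club, rescanning the friends list and a per-member list built by nested scans (with list membership tests), B makes a single pass over the club dictionary, computing for each person a weight (friend multiplicity + number of clubs shared with the target person, via set lookups) and adding it to a per-club score dictionary, then sorts the score items once.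
import Mathlib
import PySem

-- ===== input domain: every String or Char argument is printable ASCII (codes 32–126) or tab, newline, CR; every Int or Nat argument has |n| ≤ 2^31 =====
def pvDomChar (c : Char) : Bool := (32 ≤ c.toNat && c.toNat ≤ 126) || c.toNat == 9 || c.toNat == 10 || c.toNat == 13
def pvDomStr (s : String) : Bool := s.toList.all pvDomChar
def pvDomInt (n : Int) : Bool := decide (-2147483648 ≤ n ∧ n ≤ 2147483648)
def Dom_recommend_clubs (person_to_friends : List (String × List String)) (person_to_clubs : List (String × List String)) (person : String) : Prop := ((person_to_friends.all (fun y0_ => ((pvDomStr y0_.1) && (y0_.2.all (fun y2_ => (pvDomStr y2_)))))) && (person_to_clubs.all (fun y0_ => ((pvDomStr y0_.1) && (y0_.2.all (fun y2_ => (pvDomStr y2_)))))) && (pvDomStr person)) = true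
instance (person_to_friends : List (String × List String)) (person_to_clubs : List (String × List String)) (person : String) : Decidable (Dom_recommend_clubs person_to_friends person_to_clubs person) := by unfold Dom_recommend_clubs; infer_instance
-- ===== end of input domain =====

-- B replaces A's quadratic per-club scans with one pass over the club dict that accumulates per-club scores in a dictionary (inverted weighting), then sorts the items once; equivalence of the return values is proved below (objective: faster).


-- ===== PORT A =====
-- A-side helpers: one per loop of the Python, same state, same order
def pvA_clubs (p2c : PySem.Dict String (List String)) (MyClubs : List String) : List String :=
  p2c.keys.foldl (fun clubs people =>
    (p2c.getD people []).foldl (fun clubs cl =>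
      if cl ∉ clubs ∧ cl ∉ MyClubs then clubs ++ [cl] else clubs) clubs) []

def pvA_friendScore (p2c : PySem.Dict String (List String)) (clubs friends : List String) : List Int :=
  (PySem.List.pyRange 0 (clubs.length : Int) 1).foldl (fun score i =>
    friends.foldl (fun score fr =>
      if p2c.contains fr then
        (if PySem.List.pyGetD clubs i "" ∈ p2c.getD fr [] then score ++ [i] else score)
      else score) score) []

def pvA_members (p2c : PySem.Dict String (List String)) (MyClubs : List String) : List String :=
  MyClubs.foldl (fun cm x1 =>
    p2c.keys.foldl (fun cm x2 =>
      if x1 ∈ p2c.getD x2 [] then cm ++ [x2] else cm) cm) []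

def pvA_memberScore (p2c : PySem.Dict String (List String)) (clubs ClubMembers : List String)
    (score : List Int) : List Int :=
  (PySem.List.pyRange 0 (clubs.length : Int) 1).foldl (fun score i1 =>
    ClubMembers.foldl (fun score fr1 =>
      if PySem.List.pyGetD clubs i1 "" ∈ p2c.getD fr1 [] then score ++ [i1] else score) score) score

def pvA_result (clubs : List String) (score : List Int) : List (String × Int) :=
  (PySem.List.pyRange 0 (clubs.length : Int) 1).foldl (fun cs f =>
    let s : Int := (PySem.List.count score f : Int)
    if s > 0 then cs ++ [(PySem.List.pyGetD clubs f "", s)] else cs) []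

def recommend_clubs (person_to_friends : List (String × List String)) (person_to_clubs : List (String × List String)) (person : String) : List (String × Int) :=
  let p2c := PySem.Dict.ofList person_to_clubs
  let p2f := PySem.Dict.ofList person_to_friends
  let MyClubs := if p2c.contains person then p2c.getD person [] else []
  let friends := if p2f.contains person then p2f.getD person [] else []
  let clubs := PySem.List.sorted (pvA_clubs p2c MyClubs) (fun x => x)
  let score := pvA_friendScore p2c clubs friends
  let ClubMembers := pvA_members p2c MyClubs
  let score := pvA_memberScore p2c clubs ClubMembers score
  pvA_result clubs score

-- ===== PORT B =====
-- B-side helpers: the counter loop, the per-person weight, the score dict, the final sort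
def pvB_friendCount (friends : List String) : PySem.Dict String Int :=
  friends.foldl (fun d fr => d.insert fr (d.getD fr 0 + 1)) PySem.Dict.empty

def pvB_weight (friend_count : PySem.Dict String Int) (my_clubs : List String)
    (p : String) (club_set : PySem.Set String) : Int :=
  my_clubs.foldl (fun w c => if c ∈ club_set then w + 1 else w) (friend_count.getD p 0)

def pvB_score (p2c : PySem.Dict String (List String)) (friend_count : PySem.Dict String Int)
    (my_clubs : List String) (my_set : PySem.Set String) : PySem.Dict String Int :=
  p2c.items.foldl (fun score pr =>
    let club_set := PySem.Set.ofList pr.2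
    let w := pvB_weight friend_count my_clubs pr.1 club_set
    if w > 0 then
      club_set.foldl (fun score c =>
        if c ∉ my_set then score.insert c (score.getD c 0 + w) else score) score
    else score) PySem.Dict.empty

def recommend_clubs_alt (person_to_friends : List (String × List String)) (person_to_clubs : List (String × List String)) (person : String) : List (String × Int) :=
  let p2c := PySem.Dict.ofList person_to_clubs
  let my_clubs := p2c.getD person []
  let my_set := PySem.Set.ofList my_clubs
  let friend_count := pvB_friendCount ((PySem.Dict.ofList person_to_friends).getD person [])
  let score := pvB_score p2c friend_count my_clubs my_set
  PySem.List.sorted2 score.items (fun pr => pr.1) (fun pr => pr.2)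

-- ===== PRECONDITION & SPEC =====
def Spec_recommend_clubs (person_to_friends : List (String × List String)) (person_to_clubs : List (String × List String)) (person : String) (out : List (String × Int)) : Prop := out = recommend_clubs_alt person_to_friends person_to_clubs person
instance (person_to_friends : List (String × List String)) (person_to_clubs : List (String × List String)) (person : String) (out : List (String × Int)) : Decidable (Spec_recommend_clubs person_to_friends person_to_clubs person out) := by unfold Spec_recommend_clubs; infer_instance

-- ===== CLAIM (what is proved, stated in full; the proofs are below) =====
def Claim_equal_recommend_clubs : Prop := ∀ (person_to_friends : List (String × List String)) (person_to_clubs : List (String × List String)) (person : String), Dom_recommend_clubs person_to_friends person_to_clubs person → Spec_recommend_clubs person_to_friends person_to_clubs person (recommend_clubs person_to_friends person_to_clubs person)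

-- ===== LEMMAS AND PROOFS =====

-- proof helpers: the list of all clubs mentioned in the dict, and the common score function
def pvAllC (d : PySem.Dict String (List String)) : List String :=
  d.keys.flatMap (fun p => d.getD p [])

def pvU (d : PySem.Dict String (List String)) (friends my : List String) (c : String) : Nat :=
  (d.keys.map (fun p =>
    if c ∈ d.getD p [] then
      friends.count p + my.countP (fun x => decide (x ∈ d.getD p []))
    else 0)).sum

def pvSB (friends my : List String) (its : List (String × List String)) (c : String) : Int :=
  (its.map (fun pr =>
    if c ∈ pr.2 ∧ c ∉ my then
      ((friends.count pr.1 : Int) + (my.countP (fun x => decide (x ∈ pr.2)) : Int))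
    else 0)).sum

-- ---- generic list facts ----
theorem pv_pairwise_lt_of_nodup {l : List String}
    (h1 : l.Pairwise (fun a b => a ≤ b)) (h2 : l.Nodup) :
    l.Pairwise (fun a b => a < b) := by
  have := h1.and h2
  exact this.imp (fun h => lt_of_le_of_ne h.1 h.2)

theorem pv_sum_ite_eq_mem (K : List String) (hK : K.Nodup) (r : String → Bool) (x : String) :
    (K.map (fun p => if r p ∧ p = x then 1 else 0)).sum
      = if x ∈ K ∧ r x then 1 else 0 := by
  induction K with
  | nil => simp
  | cons k K ih =>
    rcases List.nodup_cons.mp hK with ⟨hk, hK'⟩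
    simp only [List.map_cons, List.sum_cons, ih hK', List.mem_cons]
    by_cases hx : x = k
    · subst hx
      simp [hk]
    · by_cases hr : r k = true <;> by_cases hm : x ∈ K <;> simp_all [Ne.symm hx]

theorem pv_countP_mem_keys (K : List String) (hK : K.Nodup) (r : String → Bool) (l : List String) :
    l.countP (fun f => decide (f ∈ K) && r f)
      = (K.map (fun p => if r p then l.count p else 0)).sum := by
  induction l with
  | nil => simp [List.count_nil]
  | cons a l ih =>
    simp only [List.countP_cons, ih]
    have : ∀ p, (if r p then (a :: l).count p else 0)
        = (if r p then l.count p else 0) + (if r p ∧ p = a then 1 else 0) := by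
      intro p
      by_cases hp : (p : String) = a
      · subst hp; by_cases hr : r p = true <;> simp [hr]
      · have hcnt : List.count p (a :: l) = List.count p l := by
          rw [List.count_cons, if_neg (by simp only [beq_iff_eq]; exact fun h => hp h.symm),
            Nat.add_zero]
        rw [hcnt, if_neg (fun h : r p = true ∧ p = a => hp h.2), Nat.add_zero]
    rw [List.map_congr_left (fun p _ => this p), List.sum_map_add,
      pv_sum_ite_eq_mem K hK r a]
    by_cases hm : a ∈ K <;> by_cases hr : r a = true <;> simp [hm, hr]

theorem pv_sum_sum_comm (l K : List String) (F : String → String → Nat) :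
    (l.map (fun a => (K.map (fun b => F a b)).sum)).sum
      = (K.map (fun b => (l.map (fun a => F a b)).sum)).sum := by
  induction l with
  | nil => simp [List.map_const']
  | cons a l ih =>
    simp only [List.map_cons, List.sum_cons, ih, ← List.sum_map_add]

theorem pv_cnt_flatMap_replicate (l : List Int) (k : Int → Nat) (hl : l.Nodup) (f : Int) :
    (l.flatMap (fun i => List.replicate (k i) i)).count f
      = if f ∈ l then k f else 0 := by
  induction l with
  | nil => simp
  | cons a l ih =>
    rcases List.nodup_cons.mp hl with ⟨ha, hl'⟩
    simp only [List.flatMap_cons, List.count_append, ih hl', List.count_replicate, List.mem_cons]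
    by_cases hf : a = f
    · subst hf; simp [ha]
    · simp [hf, Ne.symm hf]

-- ---- A side ----
theorem pv_clubsfold_mem (my : List String) (l : List String) (acc : List String) (x : String) :
    x ∈ l.foldl (fun clubs cl =>
        if cl ∉ clubs ∧ cl ∉ my then clubs ++ [cl] else clubs) acc
      ↔ x ∈ acc ∨ (x ∈ l ∧ x ∉ my) := by
  induction l generalizing acc with
  | nil => simp
  | cons a l ih =>
    simp only [List.foldl_cons, ih, List.mem_cons]
    by_cases ha : a ∉ acc ∧ a ∉ my
    · rw [if_pos ha]
      constructor
      · rintro (h | h)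
        · rcases List.mem_append.mp h with h | h
          · exact Or.inl h
          · simp only [List.mem_singleton] at h; subst h; exact Or.inr ⟨Or.inl rfl, ha.2⟩
        · exact Or.inr ⟨Or.inr h.1, h.2⟩
      · rintro (h | ⟨h | h, hx⟩)
        · exact Or.inl (List.mem_append.mpr (Or.inl h))
        · subst h; exact Or.inl (List.mem_append.mpr (Or.inr (by simp)))
        · exact Or.inr ⟨h, hx⟩
    · rw [if_neg ha]
      rcases not_and_or.mp ha with ha | ha
      · rw [not_not] at ha
        constructor
        · rintro (h | h)
          · exact Or.inl h
          · exact Or.inr ⟨Or.inr h.1, h.2⟩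
        · rintro (h | ⟨h | h, hx⟩)
          · exact Or.inl h
          · subst h; exact Or.inl ha
          · exact Or.inr ⟨h, hx⟩
      · rw [not_not] at ha
        constructor
        · rintro (h | h)
          · exact Or.inl h
          · exact Or.inr ⟨Or.inr h.1, h.2⟩
        · rintro (h | ⟨h | h, hx⟩)
          · exact Or.inl h
          · exact absurd ha (h ▸ hx)
          · exact Or.inr ⟨h, hx⟩

theorem pv_clubsfold_nodup (my : List String) (l : List String) (acc : List String)
    (hacc : acc.Nodup) :
    (l.foldl (fun clubs cl =>
        if cl ∉ clubs ∧ cl ∉ my then clubs ++ [cl] else clubs) acc).Nodup := by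
  induction l generalizing acc with
  | nil => simpa
  | cons a l ih =>
    simp only [List.foldl_cons]
    by_cases ha : a ∉ acc ∧ a ∉ my
    · rw [if_pos ha]
      exact ih _ (by simp [List.nodup_append, hacc]; exact fun y hy h => ha.1 (h ▸ hy))
    · rw [if_neg ha]; exact ih _ hacc

theorem pv_mem_pvA_clubs (d : PySem.Dict String (List String)) (my : List String) (x : String) :
    x ∈ pvA_clubs d my ↔ x ∈ pvAllC d ∧ x ∉ my := by
  rw [pvA_clubs, ← List.foldl_flatMap]
  rw [show d.keys.flatMap (fun p => d.getD p []) = pvAllC d from rfl]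
  simp [pv_clubsfold_mem]

theorem pv_nodup_pvA_clubs (d : PySem.Dict String (List String)) (my : List String) :
    (pvA_clubs d my).Nodup := by
  rw [pvA_clubs, ← List.foldl_flatMap]
  exact pv_clubsfold_nodup my _ [] List.nodup_nil

theorem pv_pvA_friendScore_eq (d : PySem.Dict String (List String)) (clubs friends : List String) :
    pvA_friendScore d clubs friends
      = (PySem.List.pyRange 0 (clubs.length : Int) 1).flatMap (fun i =>
          List.replicate (friends.countP (fun fr =>
            d.contains fr && decide (PySem.List.pyGetD clubs i "" ∈ d.getD fr []))) i) := by
  have h1 : ∀ (i : Int) (score : List Int),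
      friends.foldl (fun score fr =>
        if d.contains fr then
          (if PySem.List.pyGetD clubs i "" ∈ d.getD fr [] then score ++ [i] else score)
        else score) score
      = score ++ List.replicate (friends.countP (fun fr =>
          d.contains fr && decide (PySem.List.pyGetD clubs i "" ∈ d.getD fr []))) i := by
    intro i score
    rw [show (fun (score : List Int) fr =>
          if d.contains fr then
            (if PySem.List.pyGetD clubs i "" ∈ d.getD fr [] then score ++ [i] else score)
          else score)
        = (fun (score : List Int) fr =>
            if (fun fr => d.contains fr
                && decide (PySem.List.pyGetD clubs i "" ∈ d.getD fr [])) fr = true then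
              score ++ [(fun (_ : String) => i) fr]
            else score) from by
      funext sc fr
      by_cases h : d.contains fr = true <;>
        by_cases h2 : PySem.List.pyGetD clubs i "" ∈ d.getD fr [] <;> simp [h, h2]]
    rw [PySem.List.foldl_append_if]
    rw [List.map_const', List.countP_eq_length_filter]
  rw [pvA_friendScore]
  rw [PySem.List.foldl_congr_mem _ _ (fun score i =>
      score ++ List.replicate (friends.countP (fun fr =>
        d.contains fr && decide (PySem.List.pyGetD clubs i "" ∈ d.getD fr []))) i) _
      (fun acc x _ => h1 x acc), PySem.List.foldl_append_eq_flatMap]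
  simp

theorem pv_pvA_members_eq (d : PySem.Dict String (List String)) (my : List String) :
    pvA_members d my
      = my.flatMap (fun x1 => d.keys.filter (fun x2 => decide (x1 ∈ d.getD x2 []))) := by
  have h1 : ∀ (x1 : String) (cm : List String),
      d.keys.foldl (fun cm x2 => if x1 ∈ d.getD x2 [] then cm ++ [x2] else cm) cm
      = cm ++ d.keys.filter (fun x2 => decide (x1 ∈ d.getD x2 [])) := by
    intro x1 cm
    rw [show (fun (cm : List String) x2 => if x1 ∈ d.getD x2 [] then cm ++ [x2] else cm)
        = (fun (cm : List String) x2 =>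
            if (fun x2 => decide (x1 ∈ d.getD x2 [])) x2 = true then
              cm ++ [(fun (x2 : String) => x2) x2]
            else cm) from by
      funext cm x2; by_cases h : x1 ∈ d.getD x2 [] <;> simp [h]]
    rw [PySem.List.foldl_append_if]
    simp
  rw [pvA_members]
  rw [PySem.List.foldl_congr_mem _ _ (fun cm x1 =>
      cm ++ d.keys.filter (fun x2 => decide (x1 ∈ d.getD x2 []))) _
      (fun acc x _ => h1 x acc), PySem.List.foldl_append_eq_flatMap]
  simp

theorem pv_pvA_memberScore_eq (d : PySem.Dict String (List String))
    (clubs CM : List String) (s : List Int) :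
    pvA_memberScore d clubs CM s
      = s ++ (PySem.List.pyRange 0 (clubs.length : Int) 1).flatMap (fun i =>
          List.replicate (CM.countP (fun m =>
            decide (PySem.List.pyGetD clubs i "" ∈ d.getD m []))) i) := by
  have h1 : ∀ (i : Int) (score : List Int),
      CM.foldl (fun score fr1 =>
        if PySem.List.pyGetD clubs i "" ∈ d.getD fr1 [] then score ++ [i] else score) score
      = score ++ List.replicate (CM.countP (fun m =>
          decide (PySem.List.pyGetD clubs i "" ∈ d.getD m []))) i := by
    intro i score
    rw [show (fun (score : List Int) fr1 =>
          if PySem.List.pyGetD clubs i "" ∈ d.getD fr1 [] then score ++ [i] else score)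
        = (fun (score : List Int) fr1 =>
            if (fun m => decide (PySem.List.pyGetD clubs i "" ∈ d.getD m [])) fr1 = true then
              score ++ [(fun (_ : String) => i) fr1]
            else score) from by
      funext sc fr1; by_cases h : PySem.List.pyGetD clubs i "" ∈ d.getD fr1 [] <;> simp [h]]
    rw [PySem.List.foldl_append_if]
    rw [List.map_const', List.countP_eq_length_filter]
  rw [pvA_memberScore]
  rw [PySem.List.foldl_congr_mem _ _ (fun score i =>
      score ++ List.replicate (CM.countP (fun m =>
        decide (PySem.List.pyGetD clubs i "" ∈ d.getD m []))) i) _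
      (fun acc x _ => h1 x acc), PySem.List.foldl_append_eq_flatMap]

theorem pv_members_countP (d : PySem.Dict String (List String)) (my : List String)
    (c : String) :
    (my.flatMap (fun x1 => d.keys.filter (fun x2 => decide (x1 ∈ d.getD x2 [])))).countP
        (fun m => decide (c ∈ d.getD m []))
      = (d.keys.map (fun p =>
          if c ∈ d.getD p [] then my.countP (fun x => decide (x ∈ d.getD p [])) else 0)).sum := by
  rw [List.countP_flatMap]
  have h1 : ∀ x1, (List.countP (fun m => decide (c ∈ d.getD m []))
        ∘ fun x1 => d.keys.filter (fun x2 => decide (x1 ∈ d.getD x2 []))) x1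
      = (d.keys.map (fun p =>
          if decide (c ∈ d.getD p []) && decide (x1 ∈ d.getD p []) then 1 else 0)).sum := by
    intro x1
    simp only [Function.comp, List.countP_filter]
    rw [← PySem.List.sum_map_ite_one_zero_nat]
  rw [List.map_congr_left (fun x1 _ => h1 x1), pv_sum_sum_comm]
  congr 1
  apply List.map_congr_left
  intro p _
  by_cases hc : c ∈ d.getD p []
  · simp only [hc, decide_true, Bool.true_and, if_true]
    rw [PySem.List.sum_map_ite_one_zero_nat]
  · simp [hc]

theorem pv_result_of_counts (clubs : List String) (S : List Int) (U : String → Nat)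
    (hcount : ∀ f ∈ PySem.List.pyRange 0 (clubs.length : Int) 1,
      PySem.List.count S f = U (PySem.List.pyGetD clubs f "")) :
    pvA_result clubs S
      = (clubs.filter (fun c => decide (0 < U c))).map (fun c => (c, (U c : Int))) := by
  rw [pvA_result]
  rw [show (fun (cs : List (String × Int)) f =>
        let s : Int := (PySem.List.count S f : Int)
        if s > 0 then cs ++ [(PySem.List.pyGetD clubs f "", s)] else cs)
      = (fun (cs : List (String × Int)) f =>
          if (fun f => decide (0 < (PySem.List.count S f : Int))) f = true then
            cs ++ [(fun f => (PySem.List.pyGetD clubs f "", (PySem.List.count S f : Int))) f]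
          else cs) from by
    funext cs f
    by_cases h : (0 : Int) < (PySem.List.count S f : Int) <;> simp_all]
  rw [PySem.List.foldl_append_if]
  rw [List.filter_congr (l := PySem.List.pyRange 0 (clubs.length : Int) 1)
    (q := fun f => decide (0 < U (PySem.List.pyGetD clubs f "")))
    (fun f hf => by rw [hcount f hf]; simp)]
  rw [List.map_congr_left (l := (PySem.List.pyRange 0 (clubs.length : Int) 1).filter
      (fun f => decide (0 < U (PySem.List.pyGetD clubs f ""))))
    (g := fun f => (PySem.List.pyGetD clubs f "", (U (PySem.List.pyGetD clubs f "") : Int)))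
    (fun f hf => by rw [hcount f (List.mem_of_mem_filter hf)])]
  conv_rhs => rw [← PySem.List.map_pyGetD_pyRange_zero' clubs ""]
  rw [List.filter_map, List.map_map]
  rfl

theorem pv_A_main (d : PySem.Dict String (List String)) (friends my : List String)
    (hK : d.keys.Nodup) (clubs : List String) :
    pvA_result clubs
        (pvA_memberScore d clubs (pvA_members d my) (pvA_friendScore d clubs friends))
      = (clubs.filter (fun c => decide (0 < pvU d friends my c))).map
          (fun c => (c, (pvU d friends my c : Int))) := by
  rw [pv_pvA_friendScore_eq, pv_pvA_members_eq, pv_pvA_memberScore_eq]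
  apply pv_result_of_counts
  intro f hf
  rw [PySem.List.count_eq, List.count_append]
  rw [pv_cnt_flatMap_replicate (PySem.List.pyRange 0 (clubs.length : Int) 1)
    (fun i => friends.countP (fun fr =>
      d.contains fr && decide (PySem.List.pyGetD clubs i "" ∈ d.getD fr [])))
    (PySem.List.nodup_pyRange_one _ _) f]
  rw [pv_cnt_flatMap_replicate (PySem.List.pyRange 0 (clubs.length : Int) 1)
    (fun i => (my.flatMap (fun x1 =>
        d.keys.filter (fun x2 => decide (x1 ∈ d.getD x2 [])))).countP (fun m =>
      decide (PySem.List.pyGetD clubs i "" ∈ d.getD m [])))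
    (PySem.List.nodup_pyRange_one _ _) f]
  rw [if_pos hf, if_pos hf]
  rw [pv_members_countP d my (PySem.List.pyGetD clubs f "")]
  rw [List.countP_congr (q := fun fr => decide (fr ∈ d.keys)
      && decide (PySem.List.pyGetD clubs f "" ∈ d.getD fr []))
    (fun fr _ => by rw [PySem.Dict.contains_eq_decide_mem_keys])]
  rw [pv_countP_mem_keys d.keys hK _ friends]
  rw [pvU, ← List.sum_map_add]
  apply congrArg List.sum
  apply List.map_congr_left
  intro p _
  by_cases h : PySem.List.pyGetD clubs f "" ∈ d.getD p [] <;> simp [h]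

-- ---- B side ----
theorem pv_friendCount_getD (friends : List String) (p : String) :
    (pvB_friendCount friends).getD p 0 = (friends.count p : Int) := by
  rw [pvB_friendCount, PySem.Dict.getD_foldl_insert_add_one]
  simp

theorem pv_weight_eq (friends my cl : List String) (p : String) :
    pvB_weight (pvB_friendCount friends) my p (PySem.Set.ofList cl)
      = (friends.count p : Int) + (my.countP (fun x => decide (x ∈ cl)) : Int) := by
  rw [pvB_weight]
  rw [show (fun (w : Int) c => if c ∈ PySem.Set.ofList cl then w + 1 else w)
      = (fun (w : Int) c => if (fun c => decide (c ∈ PySem.Set.ofList cl)) c = true then w + 1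
          else w) from by
    funext w c; by_cases h : c ∈ PySem.Set.ofList cl <;> simp [h]]
  rw [PySem.List.foldl_count_if, pv_friendCount_getD]
  rw [List.countP_congr (q := fun x => decide (x ∈ cl))
    (fun x _ => by simp [PySem.Set.mem_ofList])]

theorem pv_inner_insert_fold (myS : PySem.Set String) (w : Int) (l : List String)
    (hl : l.Nodup) (sc : PySem.Dict String Int) :
    ((sc.keys.Nodup → (l.foldl (fun sc c =>
        if c ∉ myS then sc.insert c (sc.getD c 0 + w) else sc) sc).keys.Nodup)
    ∧ (∀ c, (l.foldl (fun sc c =>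
        if c ∉ myS then sc.insert c (sc.getD c 0 + w) else sc) sc).getD c 0
          = sc.getD c 0 + (if c ∈ l ∧ c ∉ myS then w else 0))
    ∧ (∀ c, (l.foldl (fun sc c =>
        if c ∉ myS then sc.insert c (sc.getD c 0 + w) else sc) sc).contains c
          = (sc.contains c || decide (c ∈ l ∧ c ∉ myS)))) := by
  induction l generalizing sc with
  | nil => simp
  | cons a l ih =>
    rcases List.nodup_cons.mp hl with ⟨ha, hl'⟩
    by_cases hm : a ∉ myS
    · simp only [List.foldl_cons, if_pos hm]
      refine ⟨fun h => (ih hl' _).1 (PySem.Dict.nodup_keys_insert _ _ _ h), fun c => ?_, fun c => ?_⟩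
      · rw [(ih hl' _).2.1 c, PySem.Dict.getD_insert]
        by_cases hca : c = a
        · subst hca
          simp [ha, hm]
        · simp only [if_neg hca, List.mem_cons]
          by_cases hcl : c ∈ l ∧ c ∉ myS
          · rw [if_pos hcl, if_pos ⟨Or.inr hcl.1, hcl.2⟩]
          · rw [if_neg hcl, if_neg (by rintro ⟨h1 | h1, h2⟩; exact hca h1; exact hcl ⟨h1, h2⟩)]
      · rw [(ih hl' _).2.2 c, PySem.Dict.contains_insert]
        by_cases hca : c = a
        · subst hca
          simp [ha, hm]
        · simp only [List.mem_cons, hca]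
          by_cases hcl : c ∈ l ∧ c ∉ myS
          · simp [hcl]
          · have : ¬((c = a ∨ c ∈ l) ∧ c ∉ myS) := by
              rintro ⟨h1 | h1, h2⟩; exact hca h1; exact hcl ⟨h1, h2⟩
            simp [hcl, hca]
    · simp only [List.foldl_cons, if_neg hm]
      rw [not_not] at hm
      refine ⟨fun h => (ih hl' _).1 h, fun c => ?_, fun c => ?_⟩
      · rw [(ih hl' _).2.1 c]
        congr 1
        by_cases hcl : c ∈ l ∧ c ∉ myS
        · rw [if_pos hcl, if_pos ⟨List.mem_cons_of_mem _ hcl.1, hcl.2⟩]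
        · rw [if_neg hcl, if_neg (by
            rintro ⟨h1, h2⟩
            rcases List.mem_cons.mp h1 with h1 | h1
            · exact h2 (h1 ▸ hm)
            · exact hcl ⟨h1, h2⟩)]
      · rw [(ih hl' _).2.2 c]
        congr 1
        rw [decide_eq_decide]
        constructor
        · rintro ⟨h1, h2⟩; exact ⟨List.mem_cons_of_mem _ h1, h2⟩
        · rintro ⟨h1, h2⟩
          rcases List.mem_cons.mp h1 with h1 | h1
          · exact absurd (h1 ▸ hm) h2
          · exact ⟨h1, h2⟩

theorem pv_pvSB_nonneg (friends my : List String) (its : List (String × List String)) (c : String) :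
    0 ≤ pvSB friends my its c := by
  apply List.sum_nonneg
  intro x hx
  rcases List.mem_map.mp hx with ⟨pr, _, rfl⟩
  split
  · positivity
  · exact le_refl 0

def pvStep (friends my : List String) (sc : PySem.Dict String Int)
    (pr : String × List String) : PySem.Dict String Int :=
  let club_set := PySem.Set.ofList pr.2
  let w := pvB_weight (pvB_friendCount friends) my pr.1 club_set
  if w > 0 then
    club_set.foldl (fun score c =>
      if c ∉ PySem.Set.ofList my then score.insert c (score.getD c 0 + w) else score) sc
  else sc

theorem pv_pvB_score_eq (p2c : PySem.Dict String (List String)) (friends my : List String) :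
    pvB_score p2c (pvB_friendCount friends) my (PySem.Set.ofList my)
      = p2c.items.foldl (pvStep friends my) PySem.Dict.empty := rfl

theorem pv_score_fold (friends : List String) (my : List String)
    (its : List (String × List String)) (sc : PySem.Dict String Int) (hsc : sc.keys.Nodup) :
    ((its.foldl (pvStep friends my) sc).keys.Nodup
    ∧ (∀ c, (its.foldl (pvStep friends my) sc).getD c 0 = sc.getD c 0 + pvSB friends my its c)
    ∧ (∀ c, (its.foldl (pvStep friends my) sc).contains c
        = (sc.contains c || decide (0 < pvSB friends my its c)))) := by
  induction its generalizing sc with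
  | nil => simp [pvSB, hsc]
  | cons pr its ih =>
    simp only [List.foldl_cons]
    have hw := pv_weight_eq friends my pr.2 pr.1
    have hw0 : 0 ≤ pvB_weight (pvB_friendCount friends) my pr.1 (PySem.Set.ofList pr.2) := by
      rw [hw]; positivity
    have hsb : ∀ c, pvSB friends my (pr :: its) c
        = (if c ∈ pr.2 ∧ c ∉ my then
            pvB_weight (pvB_friendCount friends) my pr.1 (PySem.Set.ofList pr.2) else 0)
          + pvSB friends my its c := by
      intro c
      simp only [pvSB, List.map_cons, List.sum_cons, hw]
    have hmemiff : ∀ c, (c ∈ PySem.Set.ofList pr.2 ∧ c ∉ PySem.Set.ofList my)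
        ↔ (c ∈ pr.2 ∧ c ∉ my) := by
      intro c
      rw [PySem.Set.mem_ofList, PySem.Set.mem_ofList]
    by_cases hpos : pvB_weight (pvB_friendCount friends) my pr.1 (PySem.Set.ofList pr.2) > 0
    · have hstep : pvStep friends my sc pr
          = (PySem.Set.ofList pr.2).foldl (fun score c =>
              if c ∉ PySem.Set.ofList my then
                score.insert c (score.getD c 0
                  + pvB_weight (pvB_friendCount friends) my pr.1 (PySem.Set.ofList pr.2))
              else score) sc := by
        rw [pvStep]; exact if_pos hpos
      have hinner := pv_inner_insert_fold (PySem.Set.ofList my)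
        (pvB_weight (pvB_friendCount friends) my pr.1 (PySem.Set.ofList pr.2))
        (PySem.Set.ofList pr.2) (PySem.Set.nodup_ofList pr.2) sc
      have hnd : (pvStep friends my sc pr).keys.Nodup := by
        rw [hstep]; exact hinner.1 hsc
      refine ⟨(ih _ hnd).1, fun c => ?_, fun c => ?_⟩
      · rw [(ih _ hnd).2.1 c, hstep, hinner.2.1 c, hsb c]
        by_cases h1 : c ∈ pr.2 ∧ c ∉ my
        · rw [if_pos ((hmemiff c).mpr h1), if_pos h1]; ring
        · rw [if_neg (fun h => h1 ((hmemiff c).mp h)), if_neg h1]; ring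
      · rw [(ih _ hnd).2.2 c, hstep, hinner.2.2 c, Bool.or_assoc]
        congr 1
        have hS := pv_pvSB_nonneg friends my its c
        by_cases h1 : c ∈ pr.2 ∧ c ∉ my <;>
          by_cases h2 : 0 < pvSB friends my its c <;>
            simp [h1, h2, hsb c] <;> omega
    · have hwz : pvB_weight (pvB_friendCount friends) my pr.1 (PySem.Set.ofList pr.2) = 0 := by
        omega
      have hstep : pvStep friends my sc pr = sc := by
        rw [pvStep]; exact if_neg hpos
      rw [hstep]
      refine ⟨(ih _ hsc).1, fun c => ?_, fun c => ?_⟩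
      · rw [(ih _ hsc).2.1 c, hsb c, hwz]
        simp
      · rw [(ih _ hsc).2.2 c, hsb c, hwz]
        simp

theorem pv_mem_items_iff (d : PySem.Dict String Int) (hn : d.keys.Nodup) (c : String) (v : Int) :
    (c, v) ∈ d.items ↔ (d.contains c = true ∧ d.getD c 0 = v) := by
  rw [← PySem.Dict.get?_eq_some_iff_mem_items d c v hn, PySem.Dict.contains_eq_isSome_get?,
    PySem.Dict.getD_eq_get?_getD]
  cases h : d.get? c with
  | none => simp
  | some v' => simp [eq_comm]

theorem pv_pvSB_eq_pvU (d : PySem.Dict String (List String)) (friends my : List String)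
    (hK : d.keys.Nodup) (c : String) :
    pvSB friends my d.items c
      = if c ∈ my then 0 else (pvU d friends my c : Int) := by
  rw [pvSB, PySem.Dict.items_eq_map_keys d hK [], List.map_map]
  by_cases hc : c ∈ my
  · rw [if_pos hc]
    rw [List.map_congr_left (g := fun _ => (0 : Int)) (fun p _ => by
      simp [Function.comp, hc])]
    simp
  · rw [if_neg hc, pvU, Nat.cast_list_sum, List.map_map]
    apply congrArg List.sum
    apply List.map_congr_left
    intro p _
    simp only [Function.comp]
    by_cases h : c ∈ d.getD p [] <;> simp [h, hc]

theorem pv_pvU_zero (d : PySem.Dict String (List String)) (friends my : List String)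
    (c : String) (hc : c ∉ pvAllC d) : pvU d friends my c = 0 := by
  rw [pvU, List.sum_eq_zero]
  intro x hx
  rcases List.mem_map.mp hx with ⟨p, hp, rfl⟩
  rw [if_neg (fun h => hc (List.mem_flatMap.mpr ⟨p, hp, h⟩))]

-- ---- sorted2 on fst-distinct pairs ----
theorem pv_insertBy_congr {α : Type} (before before' : α → α → Bool) (x : α) (acc : List α)
    (h : ∀ y ∈ acc, before x y = before' x y) :
    PySem.List.insertBy before x acc = PySem.List.insertBy before' x acc := by
  induction acc with
  | nil => rfl
  | cons y ys ih =>
    simp only [PySem.List.insertBy]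
    rw [h y List.mem_cons_self]
    by_cases hb : before' x y = true
    · simp [hb]
    · simp only [hb]
      rw [ih (fun z hz => h z (List.mem_cons_of_mem _ hz))]

theorem pv_foldl_insertBy_congr {α : Type} (before before' : α → α → Bool) (U : List α)
    (h : ∀ a ∈ U, ∀ b ∈ U, before a b = before' a b) :
    ∀ (xs acc : List α), (∀ y ∈ xs, y ∈ U) → (∀ y ∈ acc, y ∈ U) →
    xs.foldl (fun l x => PySem.List.insertBy before x l) acc
      = xs.foldl (fun l x => PySem.List.insertBy before' x l) acc := by
  intro xs
  induction xs with
  | nil => intro acc _ _; rfl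
  | cons x xs ih =>
    intro acc hxs hacc
    simp only [List.foldl_cons]
    rw [pv_insertBy_congr before before' x acc
      (fun y hy => h x (hxs x List.mem_cons_self) y (hacc y hy))]
    refine ih _ (fun y hy => hxs y (List.mem_cons_of_mem _ hy)) (fun y hy => ?_)
    rcases (PySem.List.mem_insertBy before' x y acc).mp hy with e | hy'
    · exact e ▸ hxs x List.mem_cons_self
    · exact hacc y hy'

theorem pv_sorted2_eq_of_perm_of_pairwise_fst_lt (xs ys : List (String × Int))
    (hfst : (xs.map Prod.fst).Nodup) (hperm : ys.Perm xs)
    (hpw : ys.Pairwise (fun a b => a.1 < b.1)) :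
    PySem.List.sorted2 xs (fun pr => pr.1) (fun pr => pr.2) = ys := by
  have hinj : ∀ a ∈ xs, ∀ b ∈ xs, a.1 = b.1 → a = b :=
    fun a ha b hb hab => List.inj_on_of_nodup_map hfst ha hb hab
  have hcmp : ∀ a ∈ xs, ∀ b ∈ xs,
      (fun (a b : String × Int) =>
        decide (a.1 < b.1) || (!decide (b.1 < a.1) && decide (a.2 < b.2))) a b
      = (fun (a b : String × Int) => decide (a.1 < b.1)) a b := by
    intro a ha b hb
    by_cases h1 : a.1 < b.1
    · simp [h1]
    · by_cases h2 : b.1 < a.1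
      · simp [h1, h2]
      · have hab : a.1 = b.1 := le_antisymm (not_lt.mp h2) (not_lt.mp h1)
        have hab' := hinj a ha b hb hab
        subst hab'
        simp
  have h2 : PySem.List.sorted2 xs (fun pr => pr.1) (fun pr => pr.2)
      = xs.foldl (fun l x => PySem.List.insertBy (fun (a b : String × Int) =>
          decide (a.1 < b.1) || (!decide (b.1 < a.1) && decide (a.2 < b.2))) x l) [] := rfl
  rw [h2, pv_foldl_insertBy_congr _ (fun (a b : String × Int) => decide (a.1 < b.1)) xs hcmp xs []
    (fun y hy => hy) (by simp)]
  rw [← PySem.List.sorted_eq_foldl_insertBy]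
  exact PySem.List.sorted_eq_of_perm_of_pairwise_lt xs ys (fun p => p.1) hperm hpw

-- ===== VERDICT (by name: the statement is the Claim_ definition above) =====
theorem recommend_clubs_spec : Claim_equal_recommend_clubs := by
  intro pf pc person _
  show recommend_clubs pf pc person = recommend_clubs_alt pf pc person
  simp only [recommend_clubs, recommend_clubs_alt]
  have hK := PySem.Dict.nodup_keys_ofList pc
  have hmy : (if (PySem.Dict.ofList pc).contains person then
        (PySem.Dict.ofList pc).getD person [] else [])
      = (PySem.Dict.ofList pc).getD person [] := by
    by_cases h : (PySem.Dict.ofList pc).contains person = true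
    · rw [if_pos h]
    · rw [if_neg (by simp [h]), PySem.Dict.getD_of_not_contains _ _ (by simpa using h)]
  have hfr : (if (PySem.Dict.ofList pf).contains person then
        (PySem.Dict.ofList pf).getD person [] else [])
      = (PySem.Dict.ofList pf).getD person [] := by
    by_cases h : (PySem.Dict.ofList pf).contains person = true
    · rw [if_pos h]
    · rw [if_neg (by simp [h]), PySem.Dict.getD_of_not_contains _ _ (by simpa using h)]
  rw [hmy, hfr]
  set d := PySem.Dict.ofList pc with hd
  set my := d.getD person [] with hmydef
  set friends := (PySem.Dict.ofList pf).getD person [] with hfriendsdef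
  set clubs := PySem.List.sorted (pvA_clubs d my) (fun x => x) with hclubsdef
  rw [pv_A_main d friends my hK clubs, pv_pvB_score_eq]
  -- facts about the score dict
  have hscore := pv_score_fold friends my d.items PySem.Dict.empty PySem.Dict.nodup_keys_empty
  set score := d.items.foldl (pvStep friends my) PySem.Dict.empty with hscoredef
  have hndk : score.keys.Nodup := hscore.1
  have hgetD : ∀ c, score.getD c 0 = pvSB friends my d.items c := by
    intro c
    rw [hscore.2.1 c, PySem.Dict.getD_empty]
    ring
  have hcont : ∀ c, score.contains c = decide (0 < pvSB friends my d.items c) := by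
    intro c
    rw [hscore.2.2 c, PySem.Dict.contains_empty, Bool.false_or]
  -- facts about clubs
  have hclubs_nodup : clubs.Nodup :=
    (PySem.List.sorted_perm (pvA_clubs d my) (fun x => x) false).symm.nodup (pv_nodup_pvA_clubs d my)
  have hclubs_mem : ∀ x, x ∈ clubs ↔ x ∈ pvAllC d ∧ x ∉ my := fun x =>
    (PySem.List.mem_sorted (pvA_clubs d my) (fun x => x) false x).trans (pv_mem_pvA_clubs d my x)
  have hclubs_lt : clubs.Pairwise (fun a b => a < b) :=
    pv_pairwise_lt_of_nodup (PySem.List.sorted_pairwise (pvA_clubs d my) (fun x => x)) hclubs_nodup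
  -- the A-side output
  set Aout := (clubs.filter (fun c => decide (0 < pvU d friends my c))).map
      (fun c => (c, (pvU d friends my c : Int))) with hAoutdef
  have hA_pw : Aout.Pairwise (fun a b => a.1 < b.1) := by
    rw [hAoutdef, List.pairwise_map]
    exact hclubs_lt.filter _
  have hA_nodup : Aout.Nodup :=
    hA_pw.imp (fun {a b} h => fun e => absurd (congrArg Prod.fst e) (ne_of_lt h))
  have hfstnodup : (score.items.map Prod.fst).Nodup := hndk
  have hitems_nodup : score.items.Nodup := List.Nodup.of_map Prod.fst hfstnodup
  have hmemiff : ∀ pr : String × Int, pr ∈ Aout ↔ pr ∈ score.items := by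
    rintro ⟨c, v⟩
    rw [pv_mem_items_iff score hndk c v, hcont c, hgetD c,
      pv_pvSB_eq_pvU d friends my hK c]
    by_cases hcm : c ∈ my
    · rw [if_pos hcm]
      simp only [hAoutdef, List.mem_map, List.mem_filter]
      constructor
      · rintro ⟨c', ⟨hc', _⟩, he⟩
        have : c' = c := congrArg Prod.fst he
        subst this
        exact absurd hcm ((hclubs_mem c').mp hc').2
      · rintro ⟨h1, _⟩
        simp at h1
    · rw [if_neg hcm]
      simp only [hAoutdef, List.mem_map, List.mem_filter]
      constructor
      · rintro ⟨c', ⟨hc', hpos⟩, he⟩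
        injection he with e1 e2
        subst e1
        subst e2
        exact ⟨by simpa using hpos, rfl⟩
      · rintro ⟨h1, h2⟩
        have hposn : 0 < pvU d friends my c := by simpa using h1
        have hall : c ∈ pvAllC d := by
          by_contra hna
          rw [pv_pvU_zero d friends my c hna] at hposn
          exact lt_irrefl 0 hposn
        exact ⟨c, ⟨(hclubs_mem c).mpr ⟨hall, hcm⟩, by simpa using hposn⟩, by rw [h2]⟩
  exact (pv_sorted2_eq_of_perm_of_pairwise_fst_lt score.items Aout hfstnodup
    ((List.perm_ext_iff_of_nodup hA_nodup hitems_nodup).mpr hmemiff) hA_pw).symm
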